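-- pv_equiv track=rewrite | github.com/reetmitra/CAD_diagnosis | visualize.py | decode_label_segments
-- ===== SOURCE A (Python) =====
-- def decode_label_segments(labels):
--     """Convert a 256-length label array into contiguous segments.
--
--     Returns:
--         list of (start_idx, end_idx_exclusive, raw_label) for each non-zero run.
--         Background (0) runs are omitted.
--     """
--     segments = []
--     i = 0
--     n = len(labels)
--     while i < n:
--         lbl = labels[i]
--         if lbl == 0:
--             i += 1
--             continue
--         j = i + 1
--         while j < n and labels[j] == lbl:
--             j += 1
--         segments.append((i, j, int(lbl)))
--         i = j
--     return segments
-- ===== SOURCE B (Python) =====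
-- def decode_label_segments(labels):
--     n = len(labels)
--     # phase 1: boundary indices = every change point, plus the end sentinel n
--     bounds = [i for i in range(n) if i == 0 or labels[i] != labels[i - 1]] + [n]
--     # phase 2: consecutive boundary pairs delimit runs; keep the non-zero ones
--     segments = []
--     for s, e in zip(bounds, bounds[1:]):
--         if labels[s] != 0:
--             segments.append((s, e, int(labels[s])))
--     return segments
-- ===== Notes on version B (the rewrite author's own statement) =====
-- stated objective: alternative
-- what changed: Replaces A's single-pass nested index walk with a two-phase approach: first compute the list of change-point boundary indices plus the end sentinel, then pair consecutive boundaries and emit the non-zero runs.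
import Mathlib
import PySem

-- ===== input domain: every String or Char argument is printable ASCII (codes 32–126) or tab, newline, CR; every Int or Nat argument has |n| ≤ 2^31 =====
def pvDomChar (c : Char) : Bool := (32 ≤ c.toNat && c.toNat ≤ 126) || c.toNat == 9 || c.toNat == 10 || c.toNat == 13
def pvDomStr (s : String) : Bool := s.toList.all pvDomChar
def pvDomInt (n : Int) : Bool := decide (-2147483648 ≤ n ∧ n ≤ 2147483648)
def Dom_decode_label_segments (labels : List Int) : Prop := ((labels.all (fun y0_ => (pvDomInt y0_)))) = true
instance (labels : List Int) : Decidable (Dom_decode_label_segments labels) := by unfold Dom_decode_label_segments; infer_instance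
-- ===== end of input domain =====

-- B replaces A's nested index walk with a two-phase pass: first the list of
-- change-point boundary indices (plus the end sentinel), then consecutive
-- boundary pairs are emitted as segments when non-zero; same O(n) cost.


-- ===== PORT A =====
-- inner while loop: while j < n and labels[j] == lbl: j += 1
-- (the index j is always in 0..n when reached, so pyGet?'s getD 0 default is never used)
def jScanA (labels : List Int) (n lbl j : Int) : Int :=
  if h : j < n then
    if (PySem.List.pyGet? labels j).getD 0 == lbl then
      jScanA labels n lbl (j + 1)
    else j
  else j
termination_by (n - j).toNat
decreasing_by omega

-- termination fact for the outer loop (cited by aLoop's decreasing_by)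
theorem jScanA_ge (labels : List Int) (n lbl : Int) : ∀ j, j ≤ jScanA labels n lbl j := by
  intro j
  unfold jScanA
  split
  · split
    · have := jScanA_ge labels n lbl (j + 1)
      omega
    · omega
  · omega
termination_by j => (n - j).toNat
decreasing_by omega

-- outer while loop over i, accumulating segments
def aLoop (labels : List Int) (n i : Int) (segments : List (Int × Int × Int)) :
    List (Int × Int × Int) :=
  if _h : i < n then
    let lbl := (PySem.List.pyGet? labels i).getD 0
    if lbl == 0 then aLoop labels n (i + 1) segments
    else
      let j := jScanA labels n lbl (i + 1)
      aLoop labels n j (segments ++ [(i, j, lbl)])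
  else segments
termination_by (n - i).toNat
decreasing_by
  · omega
  · have := jScanA_ge labels n ((PySem.List.pyGet? labels i).getD 0) (i + 1); omega

def decode_label_segments (labels : List Int) : List (Int × Int × Int) :=
  aLoop labels (labels.length : Int) 0 []

-- ===== PORT B =====
-- phase 1: bounds = [i for i in range(n) if i == 0 or labels[i] != labels[i - 1]] + [n]
--   (every index read is in range, so pyGet?'s getD 0 default is never used; for i = 0
--    Python short-circuits labels[-1] away — here the disjunct i == 0 makes its value moot)
-- phase 2: for s, e in zip(bounds, bounds[1:]): if labels[s] != 0: append (s, e, labels[s])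
def decode_label_segments_alt (labels : List Int) : List (Int × Int × Int) :=
  let n : Int := (labels.length : Int)
  let bounds : List Int :=
    ((PySem.List.pyRange 0 n 1).filter (fun i =>
      i == 0 || ((PySem.List.pyGet? labels i).getD 0 != (PySem.List.pyGet? labels (i - 1)).getD 0)))
      ++ [n]
  (bounds.zip (bounds.drop 1)).foldl
    (fun segments se =>
      if (PySem.List.pyGet? labels se.1).getD 0 != 0 then
        segments ++ [(se.1, se.2, (PySem.List.pyGet? labels se.1).getD 0)]
      else segments) []

-- ===== PRECONDITION & SPEC =====
def Spec_decode_label_segments (labels : List Int) (out : List (Int × Int × Int)) : Prop := out = decode_label_segments_alt labels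
instance (labels : List Int) (out : List (Int × Int × Int)) : Decidable (Spec_decode_label_segments labels out) := by unfold Spec_decode_label_segments; infer_instance

-- ===== CLAIM (what is proved, stated in full; the proofs are below) =====
def Claim_equal_decode_label_segments : Prop := ∀ (labels : List Int), Dom_decode_label_segments labels → Spec_decode_label_segments labels (decode_label_segments labels)

-- ===== LEMMAS AND PROOFS =====

theorem drop_takeWhile (p : Int → Bool) (xs : List Int) :
    xs.drop (xs.takeWhile p).length = xs.dropWhile p := by
  induction xs with
  | nil => simp
  | cons x xs ih =>
    by_cases h : p x = true
    · simp [h, ih]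
    · simp [h]

-- canonical run decomposition (proof-only intermediate form)
def bRuns (l : List Int) : List (Int × Nat) :=
  match l with
  | [] => []
  | x :: xs =>
    (x, (xs.takeWhile (· == x)).length + 1) :: bRuns (xs.dropWhile (· == x))
termination_by l.length
decreasing_by
  simp only [List.length_cons]
  have := List.length_dropWhile_le (· == x) xs
  omega

def bGo (gs : List (Int × Nat)) (start : Int) : List (Int × Int × Int) :=
  match gs with
  | [] => []
  | (v, L) :: rest =>
    if v != 0 then (start, start + (L : Int), v) :: bGo rest (start + (L : Int))
    else bGo rest (start + (L : Int))

theorem jScanA_eq (labels : List Int) (lbl : Int) :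
    ∀ i : Nat, jScanA labels (labels.length : Int) lbl (i : Int)
      = (i : Int) + (((labels.drop i).takeWhile (· == lbl)).length : Int) := by
  intro i
  unfold jScanA
  by_cases hi : i < labels.length
  · rw [dif_pos (by exact_mod_cast hi)]
    have hdrop : labels[i] :: labels.drop (i + 1) = labels.drop i :=
      List.getElem_cons_drop hi
    have hget : PySem.List.pyGet? labels (i : Int) = some labels[i] := by
      simp [PySem.List.pyGet?_natCast, List.getElem?_eq_getElem hi]
    by_cases he : labels[i] = lbl
    · rw [if_pos (by simp [hget, he])]
      have hcast : ((i : Int) + 1) = ((i + 1 : Nat) : Int) := by push_cast; ring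
      rw [hcast, jScanA_eq labels lbl (i + 1)]
      rw [← hdrop]
      simp [he]
      ring
    · rw [if_neg (by simp [hget, he])]
      rw [← hdrop]
      simp [he]
  · rw [dif_neg (by exact_mod_cast hi)]
    rw [List.drop_eq_nil_of_le (by omega)]
    simp
termination_by i => (labels.length - i : Nat)
decreasing_by omega

theorem main_lemma (labels : List Int) :
    ∀ k i segs, labels.length - i ≤ k →
      aLoop labels (labels.length : Int) (i : Int) segs
        = segs ++ bGo (bRuns (labels.drop i)) (i : Int) := by
  intro k
  induction k with
  | zero =>
    intro i segs h
    rw [List.drop_eq_nil_of_le (by omega)]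
    unfold aLoop
    rw [dif_neg (by exact_mod_cast (by omega : ¬ i < labels.length))]
    simp [bRuns, bGo]
  | succ k ih =>
    intro i segs h
    by_cases hi : i < labels.length
    · have hdrop : labels[i] :: labels.drop (i + 1) = labels.drop i :=
        List.getElem_cons_drop hi
      have hget : (PySem.List.pyGet? labels (i : Int)).getD 0 = labels[i] := by
        simp [PySem.List.pyGet?_natCast, List.getElem?_eq_getElem hi]
      unfold aLoop
      rw [dif_pos (by exact_mod_cast hi)]
      simp only [hget]
      by_cases h0 : labels[i] = 0
      · rw [if_pos (by simp [h0])]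
        have hcast : ((i : Int) + 1) = ((i + 1 : Nat) : Int) := by push_cast; ring
        rw [hcast, ih (i + 1) segs (by omega)]
        congr 1
        -- B skips the whole zero run at once; A one element at a time
        rw [← hdrop, h0]
        set xs := labels.drop (i + 1) with hxs
        match hm : xs with
        | [] => simp [bRuns, bGo]
        | y :: ys =>
          by_cases hy : y = 0
          · subst hy
            simp only [bRuns, bGo, bne_self_eq_false, Bool.false_eq_true, if_false,
              List.takeWhile_cons, List.dropWhile_cons, beq_self_eq_true, if_true,
              List.length_cons]
            congr 1
            push_cast
            ring
          · simp only [bRuns, bGo, List.takeWhile_cons, List.dropWhile_cons,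
              show (y == (0:Int)) = false by simp [hy], Bool.false_eq_true, if_false,
              show (y != (0:Int)) = true by simp [hy], if_true, List.length_nil]
            rw [if_neg (by simp),
              show (i:Int) + ((0 + 1 : Nat) : Int) = ((i + 1 : Nat) : Int) by push_cast; ring]
      · rw [if_neg (by simp [h0])]
        have hcast : ((i : Int) + 1) = ((i + 1 : Nat) : Int) := by push_cast; ring
        rw [hcast, jScanA_eq labels labels[i] (i + 1)]
        set t := ((labels.drop (i + 1)).takeWhile (· == labels[i])).length with ht
        have hj : ((i + 1 : Nat) : Int) + (t : Int) = ((i + 1 + t : Nat) : Int) := by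
          push_cast; ring
        rw [hj, ih (i + 1 + t) _ (by omega)]
        rw [List.append_assoc]
        congr 1
        rw [← hdrop]
        simp only [bRuns, bGo]
        rw [if_pos (by simp [h0])]
        have hdrop2 : labels.drop (i + 1 + t) = (labels.drop (i + 1)).dropWhile (· == labels[i]) := by
          rw [show i + 1 + t = (i + 1) + t from rfl, ← List.drop_drop, ht,
            drop_takeWhile]
        rw [hdrop2]
        simp only [List.singleton_append]
        have hl : ((i + 1 + t : Nat) : Int) = (i : Int) + ((t + 1 : Nat) : Int) := by
          push_cast; ring
        rw [hl, ht]
    · rw [List.drop_eq_nil_of_le (by omega)]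
      unfold aLoop
      rw [dif_neg (by exact_mod_cast hi)]
      simp [bRuns, bGo]

-- ===== B-side: change-point characterisation =====

-- the Nat-level change-point predicate of phase 1
def natPred (labels : List Int) (k : Nat) : Bool :=
  (k == 0) || (labels.getD k 0 != labels.getD (k - 1) 0)

-- change points of l relative to a preceding value
def chP (prev : Int) (l : List Int) : List Nat :=
  (List.range l.length).filter (fun k => l.getD k 0 != (prev :: l).getD k 0)

-- the boundary list runsB l, built run by run
def runsB (l : List Int) : List Nat :=
  match l with
  | [] => []
  | x :: xs => 0 :: (runsB (xs.dropWhile (· == x))).map (· + ((xs.takeWhile (· == x)).length + 1))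
termination_by l.length
decreasing_by
  simp only [List.length_cons]
  have := List.length_dropWhile_le (· == x) xs
  omega

-- the phase-2 fold of port B, parameterised by the bounds list
def pairsFold (labels : List Int) (b : List Int) (acc : List (Int × Int × Int)) :
    List (Int × Int × Int) :=
  (b.zip (b.drop 1)).foldl
    (fun segments se =>
      if (PySem.List.pyGet? labels se.1).getD 0 != 0 then
        segments ++ [(se.1, se.2, (PySem.List.pyGet? labels se.1).getD 0)]
      else segments) acc

theorem chP_cons (a y : Int) (ys : List Int) :
    chP a (y :: ys) = (if (y != a) = true then [0] else []) ++ (chP y ys).map (· + 1) := by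
  unfold chP
  rw [List.length_cons, List.range_succ_eq_map, List.filter_cons, List.filter_map]
  simp only [Function.comp_def]
  split <;> simp_all [show Nat.succ = (· + 1) from funext fun n => rfl]

theorem chP_eq (l : List Int) : ∀ (a : Int),
    chP a l = (runsB (l.dropWhile (· == a))).map (· + (l.takeWhile (· == a)).length) := by
  induction l with
  | nil => intro a; simp [chP, runsB]
  | cons y ys ih =>
    intro a
    rw [chP_cons]
    by_cases h : y = a
    · subst h
      simp only [bne_self_eq_false, Bool.false_eq_true, if_false, List.nil_append,
        List.takeWhile_cons, List.dropWhile_cons, beq_self_eq_true, if_true, List.length_cons]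
      rw [ih y, List.map_map]
      apply List.map_congr_left
      intro k _
      simp only [Function.comp_apply]
      omega
    · simp only [show (y != a) = true by simp [h], if_true,
        List.takeWhile_cons, List.dropWhile_cons,
        show (y == a) = false by simp [h], Bool.false_eq_true, if_false,
        List.length_nil, List.singleton_append]
      rw [ih y]
      conv_rhs => rw [runsB]
      simp [List.map_map, Function.comp]

theorem chIdx_eq (l : List Int) :
    (List.range l.length).filter (natPred l) = runsB l := by
  match l with
  | [] => simp [runsB]
  | x :: xs =>
    rw [List.length_cons, List.range_succ_eq_map, List.filter_cons, List.filter_map]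
    have h0 : natPred (x :: xs) 0 = true := by simp [natPred]
    rw [h0]
    have hpred : ((natPred (x :: xs)) ∘ Nat.succ) = (fun k => xs.getD k 0 != (x :: xs).getD k 0) := by
      funext k
      simp [natPred, Function.comp]
    rw [hpred]
    have : (List.range xs.length).filter (fun k => xs.getD k 0 != (x :: xs).getD k 0) = chP x xs := rfl
    rw [this, chP_eq xs x]
    conv_rhs => rw [runsB]
    simp only [List.map_map, if_true]
    congr 1

-- port B's Int-level bounds are the Nat-level change points, cast
theorem bounds_eq (labels : List Int) :
    (PySem.List.pyRange 0 (labels.length : Int) 1).filter (fun i =>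
        i == 0 || ((PySem.List.pyGet? labels i).getD 0 != (PySem.List.pyGet? labels (i - 1)).getD 0))
      = ((List.range labels.length).filter (natPred labels)).map (fun k : Nat => (k : Int)) := by
  rw [PySem.List.pyRange_one]
  simp only [Int.sub_zero, Int.toNat_natCast]
  have hf : (fun k : Nat => (0 : Int) + (k : Int)) = (fun k : Nat => (k : Int)) := by
    funext k; ring
  rw [hf, List.filter_map]
  refine congrArg (List.map fun k : Nat => (k : Int)) (List.filter_congr ?_)
  intro k _
  match k with
  | 0 => simp [natPred]
  | Nat.succ m =>
    have h2 : (((m + 1 : Nat) : Int) - 1) = ((m : Nat) : Int) := by push_cast; ring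
    simp only [Function.comp, h2, PySem.List.pyGet?_natCast, natPred]
    have h3 : (((m + 1 : Nat) : Int) == 0) = false := by
      simp
      omega
    have h4 : ((m + 1 : Nat) == 0) = false := by simp
    rw [h3, h4]
    simp [List.getD]

theorem alt_eq_pairsFold (labels : List Int) :
    decode_label_segments_alt labels
      = pairsFold labels
          (((List.range labels.length).filter (natPred labels)).map (fun k : Nat => (k : Int))
            ++ [(labels.length : Int)]) [] := by
  simp only [decode_label_segments_alt, pairsFold, bounds_eq]

theorem pairsFold_runs (labels : List Int) :
    ∀ fuel (l : List Int) (off : Nat) acc, l.length ≤ fuel → labels.drop off = l →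
      pairsFold labels ((runsB l).map (fun k => ((off + k : Nat) : Int)) ++ [(labels.length : Int)]) acc
        = acc ++ bGo (bRuns l) (off : Int) := by
  intro fuel
  induction fuel with
  | zero =>
    intro l off acc hf hd
    have : l = [] := by cases l <;> simp_all
    subst this
    simp [runsB, bRuns, bGo, pairsFold]
  | succ fuel ih =>
    intro l off acc hf hd
    match l with
    | [] => simp [runsB, bRuns, bGo, pairsFold]
    | x :: xs =>
      have hoff : off < labels.length := by
        by_contra hc
        rw [List.drop_eq_nil_of_le (by omega)] at hd
        simp at hd
      have hlen : labels.length = off + xs.length + 1 := by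
        have := congrArg List.length hd
        simp [List.length_drop] at this
        omega
      have hgetx : (PySem.List.pyGet? labels (off : Int)).getD 0 = x := by
        have : labels[off]? = some x := by
          have h0 : (labels.drop off)[0]? = some x := by rw [hd]; rfl
          rwa [List.getElem?_drop, Nat.add_zero] at h0
        simp [PySem.List.pyGet?_natCast, this]
      rw [runsB]
      conv_rhs => rw [bRuns]
      simp only [List.map_cons, List.map_map, List.cons_append, Nat.add_zero]
      set t := (xs.takeWhile (· == x)).length with ht
      set rest := xs.dropWhile (· == x) with hrest
      have hdroprest : labels.drop (off + t + 1) = rest := by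
        have h1 : labels.drop (off + t + 1) = (labels.drop off).drop (t + 1) := by
          rw [List.drop_drop]; congr 1
        rw [h1, hd]
        simp only [List.drop_succ_cons]
        rw [ht, drop_takeWhile]
      have htxs : t + rest.length = xs.length := by
        have := congrArg List.length (List.takeWhile_append_dropWhile (p := (· == x)) (l := xs))
        rw [List.length_append] at this
        omega
      -- massage the mapped offsets
      have hmap : (runsB rest).map ((fun k : Nat => ((off + k : Nat) : Int)) ∘ (fun k => k + (t + 1)))
          = (runsB rest).map (fun k : Nat => ((off + t + 1 + k : Nat) : Int)) := by
        apply List.map_congr_left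
        intro k _
        simp only [Function.comp_apply]
        congr 1
        omega
      rw [hmap]
      -- head of the remaining bounds list is off + t + 1
      have hhead : ∃ tail, (runsB rest).map (fun k : Nat => ((off + t + 1 + k : Nat) : Int))
            ++ [(labels.length : Int)] = (((off + t + 1 : Nat) : Int)) :: tail := by
        match hr : rest with
        | [] =>
          refine ⟨[], ?_⟩
          rw [runsB]
          have h' := htxs
          simp only [List.length_nil] at h'
          simp only [List.map_nil, List.nil_append, List.cons.injEq, and_true]
          congr 1
          omega
        | r0 :: rs =>
          rw [runsB]
          simp only [List.map_cons, List.cons_append, Nat.add_zero]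
          exact ⟨_, rfl⟩
      obtain ⟨tail, htail⟩ := hhead
      rw [htail]
      unfold pairsFold
      simp only [List.zip_cons_cons, List.drop_succ_cons, List.drop_zero, List.foldl_cons]
      simp only [hgetx]
      have hstep : ∀ acc', ((((off + t + 1 : Nat) : Int) :: tail).zip tail).foldl
            (fun segments se =>
              if (PySem.List.pyGet? labels se.1).getD 0 != 0 then
                segments ++ [(se.1, se.2, (PySem.List.pyGet? labels se.1).getD 0)]
              else segments) acc'
          = acc' ++ bGo (bRuns rest) ((off + t + 1 : Nat) : Int) := by
        intro acc'
        have := ih rest (off + t + 1) acc'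
          (by
            have hf' : xs.length ≤ fuel := by simpa using hf
            omega) hdroprest
        unfold pairsFold at this
        rw [htail] at this
        simp only [List.drop_succ_cons, List.drop_zero] at this
        exact this
      have hcast : ((off : Int) + ((t + 1 : Nat) : Int)) = ((off + t + 1 : Nat) : Int) := by
        push_cast; ring
      by_cases hx : x = 0
      · subst hx
        simp only [bne_self_eq_false, Bool.false_eq_true, if_false]
        rw [hstep acc]
        rw [bGo]
        simp only [bne_self_eq_false, Bool.false_eq_true, if_false, hcast]
      · rw [if_pos (by simp [hx]), hstep (acc ++ [((off : Int), ((off + t + 1 : Nat) : Int), x)])]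
        rw [bGo]
        rw [if_pos (by simp [hx])]
        simp only [hcast, List.append_assoc, List.singleton_append]

theorem alt_eq_bGo (labels : List Int) :
    decode_label_segments_alt labels = bGo (bRuns labels) 0 := by
  rw [alt_eq_pairsFold, chIdx_eq]
  have hmap : (runsB labels).map (fun k : Nat => (k : Int))
      = (runsB labels).map (fun k : Nat => ((0 + k : Nat) : Int)) := by
    apply List.map_congr_left
    intro k _
    simp
  rw [hmap, pairsFold_runs labels labels.length labels 0 [] le_rfl (by simp)]
  simp

-- ===== VERDICT (by name: the statement is the Claim_ definition above) =====
theorem decode_label_segments_spec : Claim_equal_decode_label_segments := by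
  intro labels _
  show _ = _
  rw [alt_eq_bGo]
  have := main_lemma labels labels.length 0 [] (by omega)
  simpa [decode_label_segments] using this
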